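-- pv_equiv track=rewrite | github.com/MarketSquare/robotframework-openapitools | src/OpenApiLibCore/models/oas_models.py | get_invalid_value_from_constraint
-- ===== SOURCE A (Python) =====
-- def get_invalid_value_from_constraint(
--     values_from_constraint: list[int]
-- ) -> int:
--     invalid_values = 2 * values_from_constraint
--     invalid_value = invalid_values.pop()
--     for value in invalid_values:
--         invalid_value = abs(invalid_value) + abs(value)
--     if not invalid_value:
--         invalid_value += 1
--     return invalid_value
-- ===== SOURCE B (Python) =====
-- def get_invalid_value_from_constraint(
--     values_from_constraint: list[int]
-- ) -> int:
--     total = 2 * sum(abs(v) for v in values_from_constraint)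
--     return total or 1
-- ===== Notes on version B (the rewrite author's own statement) =====
-- stated objective: simpler
-- what changed: Replaces the list-doubling/pop/accumulate loop by the closed form 2*sum(abs(v)) ('total or 1'); Pre_ excludes only the empty list, where A's pop() raises IndexError.
import Mathlib
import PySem

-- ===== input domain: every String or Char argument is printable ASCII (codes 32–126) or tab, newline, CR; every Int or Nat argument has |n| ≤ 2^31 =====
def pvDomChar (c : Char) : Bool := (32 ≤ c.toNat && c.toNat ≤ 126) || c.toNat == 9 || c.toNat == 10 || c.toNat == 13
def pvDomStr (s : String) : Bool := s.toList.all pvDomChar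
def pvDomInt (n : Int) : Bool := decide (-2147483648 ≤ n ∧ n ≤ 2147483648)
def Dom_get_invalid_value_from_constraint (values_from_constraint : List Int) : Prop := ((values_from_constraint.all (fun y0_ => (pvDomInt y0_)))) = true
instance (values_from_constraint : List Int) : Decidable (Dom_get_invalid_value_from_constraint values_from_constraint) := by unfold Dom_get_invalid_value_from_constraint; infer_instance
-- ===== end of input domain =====

-- B replaces A's doubled-list/pop/accumulate loop by the closed form 2*sum(abs(v)) (then 1 if zero): simpler, no temporary list.

-- ===== PORT A =====
def get_invalid_value_from_constraint (values_from_constraint : List Int) : Int :=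
  let invalid_values := values_from_constraint ++ values_from_constraint  -- 2 * list (repetition)
  match PySem.List.pop? invalid_values (-1) with   -- .pop(): none = IndexError, excluded by Pre_
  | none => 0
  | some (iv0, rest) =>
    let invalid_value := rest.foldl (fun invalid_value value => |invalid_value| + |value|) iv0
    if invalid_value = 0 then invalid_value + 1 else invalid_value

-- ===== PORT B =====
def get_invalid_value_from_constraint_alt (values_from_constraint : List Int) : Int :=
  let total := 2 * (values_from_constraint.map (fun v => |v|)).sum
  if total = 0 then 1 else total   -- `total or 1`

-- ===== PRECONDITION & SPEC =====
-- Pre_ excludes only the empty list, on which A's .pop() raises IndexError.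
def Pre_get_invalid_value_from_constraint (values_from_constraint : List Int) : Prop :=
  values_from_constraint ≠ []
instance (values_from_constraint : List Int) : Decidable (Pre_get_invalid_value_from_constraint values_from_constraint) := by unfold Pre_get_invalid_value_from_constraint; infer_instance
def pvWitness_get_invalid_value_from_constraint : List Int := [1, -2]

def Spec_get_invalid_value_from_constraint (values_from_constraint : List Int) (out : Int) : Prop := out = get_invalid_value_from_constraint_alt values_from_constraint
instance (values_from_constraint : List Int) (out : Int) : Decidable (Spec_get_invalid_value_from_constraint values_from_constraint out) := by unfold Spec_get_invalid_value_from_constraint; infer_instance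

-- ===== CLAIM (what is proved, stated in full; the proofs are below) =====
def Claim_equal_get_invalid_value_from_constraint : Prop := ∀ (values_from_constraint : List Int), Dom_get_invalid_value_from_constraint values_from_constraint → Pre_get_invalid_value_from_constraint values_from_constraint → Spec_get_invalid_value_from_constraint values_from_constraint (get_invalid_value_from_constraint values_from_constraint)

-- ===== LEMMAS AND PROOFS =====

-- Once the accumulator is nonnegative, A's loop just adds absolute values.
theorem pv_foldl_abs (t : List Int) (a : Int) (h : 0 ≤ a) :
    t.foldl (fun acc v => |acc| + |v|) a = a + (t.map (fun v => |v|)).sum := by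
  induction t generalizing a with
  | nil => simp
  | cons x xs ih =>
    simp only [List.foldl_cons, List.map_cons, List.sum_cons]
    rw [abs_of_nonneg h, ih (a + |x|) (by positivity)]; ring

-- ===== VERDICT (by name: the statement is the Claim_ definition above) =====
theorem get_invalid_value_from_constraint_spec : Claim_equal_get_invalid_value_from_constraint := by
  intro vs _ hpre
  obtain ⟨x, t, rfl⟩ := List.exists_cons_of_ne_nil hpre
  unfold Spec_get_invalid_value_from_constraint get_invalid_value_from_constraint get_invalid_value_from_constraint_alt
  have hnn : (x :: t) ≠ [] := by simp
  have h1 : (x :: t) = (x :: t).dropLast ++ [(x :: t).getLast hnn] :=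
    (List.dropLast_append_getLast hnn).symm
  have hsplit : (x :: t) ++ (x :: t)
      = (x :: (t ++ (x :: t).dropLast)) ++ [(x :: t).getLast hnn] := by
    conv_rhs => rw [List.cons_append, List.append_assoc, ← h1]
    simp
  simp only [hsplit, PySem.List.pop?_last, List.foldl_cons]
  rw [pv_foldl_abs _ _ (by positivity)]
  have h2 : ((x :: t).map (fun v => |v|)).sum
      = (((x :: t).dropLast).map (fun v => |v|)).sum + |(x :: t).getLast hnn| := by
    conv_lhs => rw [h1]
    simp [List.map_append]
  simp only [List.map_append, List.sum_append, List.map_cons, List.sum_cons] at h2 ⊢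
  have key : |(x :: t).getLast hnn| + |x| + ((t.map (fun v => |v|)).sum
      + (((x :: t).dropLast).map (fun v => |v|)).sum)
      = 2 * (|x| + (t.map (fun v => |v|)).sum) := by omega
  rw [key]
  split <;> omega
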